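-- pv_equiv track=rewrite | github.com/juleek/tasks | mangle.py | mangle_items
-- ===== SOURCE A (Python) =====
-- import typing as t
-- import itertools as iter
--
-- def mangle_items(items: t.List[t.Tuple[str, str]]) -> t.List[t.Tuple[str, str]]:
--     if len(items) == 0:
--         return []
--     cyclic_iter = iter.cycle(items)
--     next(cyclic_iter)
--     result: t.List[t.Tuple[str, str]] = []
--     for item in items:
--         result.append((item[0], next(cyclic_iter)[1]))
--     return result
-- ===== SOURCE B (Python) =====
-- import typing as t
--
-- def mangle_items(items: t.List[t.Tuple[str, str]]) -> t.List[t.Tuple[str, str]]: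
--     # Structural recursion threading the wrap-around value: each element pairs its
--     # first with its successor's second; the last element uses the carried value
--     # (the first element's second). No iterator, no rotation, no indices.
--     if not items:
--         return []
--
--     def rec(xs: t.List[t.Tuple[str, str]], wrap: str) -> t.List[t.Tuple[str, str]]:
--         if len(xs) == 1:
--             return [(xs[0][0], wrap)]
--         return [(xs[0][0], xs[1][1])] + rec(xs[1:], wrap)
--
--     return rec(items, items[0][1])
-- ===== Notes on version B (the rewrite author's own statement) =====
-- stated objective: alternative
-- what changed: Replaces A's single-pass loop over an out-of-phase itertools.cycle iterator by a structural recursion that pairs each element with its immediate successor and threads the first element's second component down as the wrap value for the last element.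
import Mathlib
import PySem

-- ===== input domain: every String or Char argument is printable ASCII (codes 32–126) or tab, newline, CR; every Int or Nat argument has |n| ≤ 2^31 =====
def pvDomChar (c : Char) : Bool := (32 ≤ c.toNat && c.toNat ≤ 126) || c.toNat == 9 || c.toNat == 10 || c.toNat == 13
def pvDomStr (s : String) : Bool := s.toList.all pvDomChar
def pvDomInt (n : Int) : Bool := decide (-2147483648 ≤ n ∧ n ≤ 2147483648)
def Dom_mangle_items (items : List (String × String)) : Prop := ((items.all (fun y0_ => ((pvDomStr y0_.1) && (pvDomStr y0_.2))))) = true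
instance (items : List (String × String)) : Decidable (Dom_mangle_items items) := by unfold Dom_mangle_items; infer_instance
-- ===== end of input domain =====

-- B replaces A's out-of-phase itertools.cycle loop by a structural recursion that pairs
-- adjacent elements and threads the wrap value down to the last element (alternative; same cost).

-- ===== PORT A =====
-- A's cyclic iterator is modelled by its state `rem`: the not-yet-yielded suffix of the
-- current pass over `items`; when `rem` is exhausted, `next` refills it from `items`.
-- `next(cyclic_iter)` = head of (if rem = [] then items else rem); new state = its tail.
def mangleLoopA (items : List (String × String)) (todo : List (String × String))
    (rem : List (String × String)) (acc : List (String × String)) : List (String × String) :=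
  match todo with
  | [] => acc
  | item :: rest =>
      let src := if rem.isEmpty then items else rem
      let nx := src.headD ("", "")
      mangleLoopA items rest src.tail (acc ++ [(item.1, nx.2)])

def mangle_items (items : List (String × String)) : List (String × String) :=
  if items.length = 0 then []
  else
    -- cyclic_iter = itertools.cycle(items); next(cyclic_iter) discards the first element,
    -- leaving iterator state items.tail
    mangleLoopA items items items.tail []

-- ===== PORT B =====
-- rec(xs, wrap): singleton pairs with the carried wrap; otherwise pair head with the
-- second component of the next element and recurse on the tail.
def mangleRecB (wrap : String) : List (String × String) → List (String × String)
  | [] => []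
  | [x] => [(x.1, wrap)]
  | x :: y :: rest => (x.1, y.2) :: mangleRecB wrap (y :: rest)

def mangle_items_alt (items : List (String × String)) : List (String × String) :=
  match items with
  | [] => []
  | x :: _ => mangleRecB x.2 items

-- ===== PRECONDITION & SPEC =====
def Spec_mangle_items (items : List (String × String)) (out : List (String × String)) : Prop := out = mangle_items_alt items
instance (items : List (String × String)) (out : List (String × String)) : Decidable (Spec_mangle_items items out) := by unfold Spec_mangle_items; infer_instance

-- ===== CLAIM (what is proved, stated in full; the proofs are below) =====
def Claim_equal_mangle_items : Prop := ∀ (items : List (String × String)), Dom_mangle_items items → Spec_mangle_items items (mangle_items items)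

-- ===== LEMMAS AND PROOFS =====

-- Loop invariant for A: while `rem` has exactly one fewer element than remain to be
-- produced, the loop zips `todo` against `rem` followed by the wrapped-around head `x`.
theorem mangleLoopA_zip (x : String × String) (xs : List (String × String)) :
    ∀ (todo rem acc : List (String × String)), rem.length + 1 = todo.length →
      mangleLoopA (x :: xs) todo rem acc
        = acc ++ (todo.zip (rem ++ [x])).map (fun p => (p.1.1, p.2.2)) := by
  intro todo
  induction todo with
  | nil => intro rem acc h; simp at h
  | cons a rest ih =>
      intro rem acc h
      match rem with
      | [] =>
          have hrest : rest = [] := by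
            cases rest with
            | nil => rfl
            | cons b l => simp at h
          subst hrest
          simp [mangleLoopA]
      | r :: rs =>
          have h' : rs.length + 1 = rest.length := by simpa using h
          have step : mangleLoopA (x :: xs) (a :: rest) (r :: rs) acc
              = mangleLoopA (x :: xs) rest rs (acc ++ [(a.1, r.2)]) := by
            simp [mangleLoopA]
          rw [step, ih rs _ h']
          simp [List.zip]

-- B's recursion computes the same zip-against-shifted-list, for any final element c
-- whose second component equals the carried wrap value.
theorem mangleRecB_zip (c : String × String) :
    ∀ (l : List (String × String)) (a : String × String),
      mangleRecB c.2 (a :: l) = ((a :: l).zip (l ++ [c])).map (fun p => (p.1.1, p.2.2)) := by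
  intro l
  induction l with
  | nil => intro a; simp [mangleRecB]
  | cons y rest ih =>
      intro a
      rw [mangleRecB]
      rw [ih y]
      simp [List.zip]

-- ===== VERDICT (by name: the statement is the Claim_ definition above) =====
theorem mangle_items_spec : Claim_equal_mangle_items := by
  unfold Claim_equal_mangle_items
  intro items _
  unfold Spec_mangle_items mangle_items mangle_items_alt
  cases items with
  | nil => simp
  | cons x xs =>
      have step : (if (x :: xs).length = 0 then ([] : List (String × String))
          else mangleLoopA (x :: xs) (x :: xs) (x :: xs).tail []) = mangleLoopA (x :: xs) (x :: xs) xs [] := by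
        simp
      rw [step, mangleLoopA_zip x xs (x :: xs) xs [] (by simp)]
      show _ = mangleRecB x.2 (x :: xs)
      rw [mangleRecB_zip x xs x]
      simp
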